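-- pv_equiv track=rewrite | github.com/pedroblackjsousa/csgostatsportugal | csgostats.py | mvpawardsingle
-- ===== SOURCE A (Python) =====
-- def mvpawardsingle(totalscores):
-- 	mvpscores = {}
-- 	for key in totalscores[0]:
-- 		killnumber = totalscores[0].get(key)
-- 		deaths = totalscores[1].get(key)
-- 		entrykills = totalscores[3].get(key)
-- 		mvpscores[key] = (killnumber - entrykills)*10 + entrykills*15 - deaths
-- 	mvp = max(mvpscores, key = mvpscores.get)
-- 	mvpscore = mvpscores.get(mvp)
-- 	return mvp
-- ===== SOURCE B (Python) =====
-- def mvpawardsingle(totalscores):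
-- 	kills = totalscores[0]
-- 	deaths = totalscores[1]
-- 	entrykills = totalscores[3]
-- 	ranking = sorted(kills, key=lambda k: kills[k]*10 + entrykills[k]*5 - deaths[k], reverse=True)
-- 	return ranking[0]
-- ===== Notes on version B (the rewrite author's own statement) =====
-- stated objective: alternative
-- what changed: B replaces A's score-dict construction plus max() scan by a ranking: it stably sorts the players by the (algebraically simplified) score kills*10 + entrykills*5 - deaths in reverse order and returns the head, which equals the first maximal key since Python's reverse sort is stable.
import Mathlib
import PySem

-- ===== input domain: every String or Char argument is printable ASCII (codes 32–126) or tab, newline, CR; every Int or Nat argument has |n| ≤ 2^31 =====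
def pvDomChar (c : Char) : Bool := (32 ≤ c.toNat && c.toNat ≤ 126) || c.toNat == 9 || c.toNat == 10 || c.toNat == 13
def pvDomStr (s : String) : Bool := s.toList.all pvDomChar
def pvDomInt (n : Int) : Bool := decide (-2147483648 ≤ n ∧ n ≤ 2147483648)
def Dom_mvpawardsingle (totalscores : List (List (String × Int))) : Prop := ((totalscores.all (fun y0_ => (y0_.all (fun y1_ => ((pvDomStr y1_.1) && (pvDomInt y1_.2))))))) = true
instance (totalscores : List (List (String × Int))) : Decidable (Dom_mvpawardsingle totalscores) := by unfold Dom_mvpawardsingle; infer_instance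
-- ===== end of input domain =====

-- B replaces A's score-dict build + max() scan by a ranking: a stable reverse sort of the players by
-- score and taking the head; return values proved equal on Pre_. Each inner 'List (String × Int)'
-- models a Python dict (PySem.Dict.ofList: insertion order, last value wins).

-- ===== PORT A =====
-- mvpscores[key] = (killnumber - entrykills)*10 + entrykills*15 - deaths, with
-- killnumber/deaths/entrykills = totalscores[0]/[1]/[3] .get(key) (present under Pre_, so getD's default is never used)
def pvScoreA (totalscores : List (List (String × Int))) (key : String) : Int :=
  ((PySem.Dict.ofList (totalscores.getD 0 [])).getD key 0
      - (PySem.Dict.ofList (totalscores.getD 3 [])).getD key 0) * 10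
    + (PySem.Dict.ofList (totalscores.getD 3 [])).getD key 0 * 15
    - (PySem.Dict.ofList (totalscores.getD 1 [])).getD key 0

-- the 'for key in totalscores[0]' loop filling the mvpscores dict
def pvMvpscores (totalscores : List (List (String × Int))) : PySem.Dict String Int :=
  (PySem.Dict.ofList (totalscores.getD 0 [])).keys.foldl
    (fun m key => m.insert key (pvScoreA totalscores key)) PySem.Dict.empty

def mvpawardsingle (totalscores : List (List (String × Int))) : String :=
  -- mvp = max(mvpscores, key=mvpscores.get): first maximal key; empty dict (ValueError) is outside Pre_
  match PySem.List.max? (pvMvpscores totalscores).keys (fun k => (pvMvpscores totalscores).getD k 0) with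
  | some mvp => mvp
  | none => ""   -- unreachable under Pre_ (Python raises ValueError)

-- ===== PORT B =====
-- lambda k: kills[k]*10 + entrykills[k]*5 - deaths[k]  (keys present under Pre_, so getD's default is never used)
def pvScoreB (totalscores : List (List (String × Int))) (key : String) : Int :=
  (PySem.Dict.ofList (totalscores.getD 0 [])).getD key 0 * 10
    + (PySem.Dict.ofList (totalscores.getD 3 [])).getD key 0 * 5
    - (PySem.Dict.ofList (totalscores.getD 1 [])).getD key 0

def mvpawardsingle_alt (totalscores : List (List (String × Int))) : String :=
  -- ranking = sorted(kills, key=…, reverse=True); return ranking[0]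
  match (PySem.List.sorted (PySem.Dict.ofList (totalscores.getD 0 [])).keys
          (pvScoreB totalscores) true).head? with
  | some mvp => mvp
  | none => ""   -- unreachable under Pre_ (Python raises IndexError)

-- ===== PRECONDITION & SPEC =====
-- Exactly where the Python A returns: indices 0,1,3 exist, the kill table is nonempty (else max() raises
-- ValueError), and every key of the kill table occurs in the death and entry-kill tables (else .get gives
-- None and the arithmetic raises TypeError).
def Pre_mvpawardsingle (totalscores : List (List (String × Int))) : Prop :=
  4 ≤ totalscores.length ∧
  totalscores.getD 0 [] ≠ [] ∧
  ∀ k ∈ (totalscores.getD 0 []).map Prod.fst,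
    k ∈ (totalscores.getD 1 []).map Prod.fst ∧ k ∈ (totalscores.getD 3 []).map Prod.fst
instance (totalscores : List (List (String × Int))) : Decidable (Pre_mvpawardsingle totalscores) := by
  unfold Pre_mvpawardsingle; infer_instance

def pvWitness_mvpawardsingle : (List (List (String × Int))) :=
  [[("a", 5), ("b", 3)], [("a", 2), ("b", 1)], [], [("a", 1), ("b", 0)]]

def Spec_mvpawardsingle (totalscores : List (List (String × Int))) (out : String) : Prop := out = mvpawardsingle_alt totalscores
instance (totalscores : List (List (String × Int))) (out : String) : Decidable (Spec_mvpawardsingle totalscores out) := by unfold Spec_mvpawardsingle; infer_instance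

-- ===== CLAIM (what is proved, stated in full; the proofs are below) =====
def Claim_equal_mvpawardsingle : Prop := ∀ (totalscores : List (List (String × Int))), Dom_mvpawardsingle totalscores → Pre_mvpawardsingle totalscores → Spec_mvpawardsingle totalscores (mvpawardsingle totalscores)

-- ===== LEMMAS AND PROOFS =====

-- the two score formulas agree: (k - e)*10 + e*15 - d = k*10 + e*5 - d
theorem pv_score_eq (totalscores : List (List (String × Int))) :
    pvScoreA totalscores = pvScoreB totalscores := by
  funext k; unfold pvScoreA pvScoreB; ring

-- head of the stable reverse sort = first maximal element = max?
theorem pv_head_insertBy {α : Type} (key : α → Int) (x : α) (l : List α) :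
    (PySem.List.insertBy (fun a b => decide (key b < key a)) x l).head?
      = match l.head? with
        | none => some x
        | some m => if key m < key x then some x else some m := by
  cases l with
  | nil => rfl
  | cons y ys =>
    by_cases h : key y < key x <;> simp [PySem.List.insertBy, h]

theorem pv_head_sorted_rev {α : Type} (xs : List α) (key : α → Int) :
    (PySem.List.sorted xs key true).head? = PySem.List.max? xs key := by
  rw [PySem.List.sorted_rev_eq_foldl_insertBy]
  unfold PySem.List.max?
  induction xs using List.reverseRecOn with
  | nil => rfl
  | append_singleton t x ih =>
    rw [List.foldl_append, List.foldl_append]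
    simp only [List.foldl_cons, List.foldl_nil]
    rw [pv_head_insertBy, ih]
    rfl

-- the running-best-key step of max(…, key=…)
def pvMaxStep (f : String → Int) (acc : Option String) (x : String) : Option String :=
  match acc with
  | none => some x
  | some m => if f m < f x then some x else some m

theorem pv_maxq_eq (xs : List String) (key : String → Int) :
    PySem.List.max? xs key = xs.foldl (pvMaxStep key) none := by
  unfold PySem.List.max?
  apply PySem.List.foldl_congr_mem
  intro acc x _
  cases acc with | none => rfl | some m => rfl

-- the running-best fold is insensitive to which of two pointwise-equal key functions is used
theorem pv_max_congr (f g : String → Int) :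
    ∀ (l : List String) (acc : Option String), (∀ x ∈ l, f x = g x) → (∀ m, acc = some m → f m = g m) →
    l.foldl (pvMaxStep f) acc = l.foldl (pvMaxStep g) acc := by
  intro l
  induction l with
  | nil => intro acc _ _; rfl
  | cons x t ih =>
    intro acc hl hacc
    have hx : f x = g x := hl x List.mem_cons_self
    have htail : ∀ y ∈ t, f y = g y := fun y hy => hl y (List.mem_cons_of_mem _ hy)
    have hstep : pvMaxStep f acc x = pvMaxStep g acc x := by
      cases acc with
      | none => rfl
      | some m0 => simp only [pvMaxStep, hacc m0 rfl, hx]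
    simp only [List.foldl_cons, hstep]
    refine ih _ htail ?_
    intro m hm
    cases acc with
    | none => cases hm; exact hx
    | some m0 =>
      by_cases h : g m0 < g x
      · simp only [pvMaxStep, h, if_true, Option.some.injEq] at hm
        cases hm; exact hx
      · simp only [pvMaxStep, h, if_false, Option.some.injEq] at hm
        cases hm; exact hacc _ rfl

theorem pv_maxq_congr (l : List String) (f g : String → Int) (h : ∀ x ∈ l, f x = g x) :
    PySem.List.max? l f = PySem.List.max? l g := by
  rw [pv_maxq_eq, pv_maxq_eq]
  exact pv_max_congr f g l none h (fun m hm => by cases hm)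

-- getD of the score dict A builds: on its keys it is the score formula
theorem pv_scores_getD (keys : List String) (f : String → Int) (hnd : keys.Nodup)
    (k : String) (hk : k ∈ keys) :
    (keys.foldl (fun m key => m.insert key (f key)) (PySem.Dict.empty : PySem.Dict String Int)).getD k 0 = f k := by
  have hitems := PySem.Dict.items_foldl_insert_fresh (l := keys) (k := fun a => a) (v := f)
      (d := (PySem.Dict.empty : PySem.Dict String Int))
      (by intro a _; exact PySem.Dict.contains_empty a) (by simpa using hnd)
  apply PySem.Dict.getD_of_mem_items
  · rw [hitems]
    simp [PySem.Dict.empty]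
    exact hk
  · show ((keys.foldl (fun m key => m.insert key (f key)) PySem.Dict.empty).items.map Prod.fst).Nodup
    rw [hitems]
    simpa [PySem.Dict.empty, List.map_map, Function.comp_def] using hnd

-- keys of the score dict A builds = the kill-table keys
theorem pv_scores_keys (keys : List String) (f : String → Int) (hnd : keys.Nodup) :
    (keys.foldl (fun m key => m.insert key (f key)) (PySem.Dict.empty : PySem.Dict String Int)).keys = keys := by
  have hitems := PySem.Dict.items_foldl_insert_fresh (l := keys) (k := fun a => a) (v := f)
      (d := (PySem.Dict.empty : PySem.Dict String Int))
      (by intro a _; exact PySem.Dict.contains_empty a) (by simpa using hnd)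
  show ((keys.foldl (fun m key => m.insert key (f key)) PySem.Dict.empty).items.map Prod.fst) = keys
  rw [hitems]
  simp [PySem.Dict.empty, List.map_map, Function.comp_def]

-- ===== VERDICT (by name: the statement is the Claim_ definition above) =====
theorem mvpawardsingle_spec : Claim_equal_mvpawardsingle := by
  intro ts _ _
  show mvpawardsingle ts = mvpawardsingle_alt ts
  unfold mvpawardsingle mvpawardsingle_alt pvMvpscores
  have hnd : (PySem.Dict.ofList (ts.getD 0 [])).keys.Nodup := PySem.Dict.nodup_keys_ofList _
  rw [pv_scores_keys _ (pvScoreA ts) hnd]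
  rw [pv_maxq_congr _ _ (pvScoreA ts) (fun x hx => pv_scores_getD _ (pvScoreA ts) hnd x hx)]
  rw [pv_score_eq, pv_head_sorted_rev]
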